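-- pv_equiv track=rewrite | github.com/Yawn-Sean/Daily_CF_Problems | daily_problems/2025/12/1217/personal_submission/cf105845f_liryc.py | solve
-- ===== SOURCE A (Python) =====
-- def solve(n: int) -> int:
--     MOD = 1000000007
--     dp0, dp1 = [0] * (n + 1), [0] * (n + 1)
--     dp0[0] = 1
--     ans = 0
--     for i in range(1, n + 1):
--         ca = [0] * i
--         p = 0
--         for j in range(n + 1):
--             p = (p + j) % i
--             dp1[j] = ca[p]
--             ca[p] = (ca[p] + dp0[j]) % MOD
--         dp0, dp1 = dp1, dp0
--         ans = (ans + dp0[-1]) % MOD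
--     return ans
-- ===== SOURCE B (Python) =====
-- def solve(n: int) -> int:
--     MOD = 1000000007
--     m = n + 1
--     tri = [j * (j + 1) // 2 for j in range(m)]
--     dp0 = [0] * m
--     dp0[0] = 1
--     ans = 0
--     for i in range(1, n + 1):
--         # first: index the positions by the residue of their triangular number mod i
--         buckets = [[] for _ in range(i)]
--         for j in range(m):
--             buckets[tri[j] % i].append(j)
--         # then: prefix-scan dp0 along each residue class independently
--         dp1 = [0] * m
--         for grp in buckets:
--             s = 0
--             for j in grp:
--                 dp1[j] = s
--                 s = (s + dp0[j]) % MOD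
--         dp0 = dp1
--         ans = (ans + dp0[-1]) % MOD
--     return ans
-- ===== Notes on version B (the rewrite author's own statement) =====
-- stated objective: alternative
-- what changed: Replaces A's single interleaved pass per i (a running triangular remainder p plus an in-place running-bucket array ca consulted and updated at every step) by a two-phase decomposition: first build an explicit index of positions grouped by the residue of a precomputed triangular-number table mod i, then fill dp1 by an independent prefix-scan over each residue group.
import Mathlib
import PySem

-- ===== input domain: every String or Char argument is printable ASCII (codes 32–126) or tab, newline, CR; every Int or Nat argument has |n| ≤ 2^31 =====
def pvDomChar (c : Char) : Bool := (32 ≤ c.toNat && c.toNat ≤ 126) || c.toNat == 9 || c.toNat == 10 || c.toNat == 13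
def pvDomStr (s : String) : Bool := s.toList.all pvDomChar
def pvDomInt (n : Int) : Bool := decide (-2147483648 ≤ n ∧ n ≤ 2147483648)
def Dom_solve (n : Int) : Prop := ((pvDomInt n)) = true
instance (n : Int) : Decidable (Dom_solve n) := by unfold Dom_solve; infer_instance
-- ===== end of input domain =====

-- B replaces A's interleaved running-bucket pass by a two-phase per-i decomposition
-- (group indices by the closed-form residue j(j+1)/2 mod i, then prefix-scan each group);
-- same asymptotic cost, objective: alternative decomposition.

-- ===== PORT A =====
-- dp values stay in [0, MOD) and indices are nonnegative under Pre_, so the state is kept in Nat.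
def solve (n : Int) : Int :=
  let MOD : Nat := 1000000007
  let m : Nat := (n + 1).toNat
  let dp0 : List Nat := (List.replicate m 0).set 0 1
  let dp1 : List Nat := List.replicate m 0
  let fin :=
    (List.range' 1 n.toNat).foldl
      (fun (st : List Nat × List Nat × Nat) (i : Nat) =>
        let dp0 := st.1
        let dp1 := st.2.1
        let ans := st.2.2
        let inner :=
          (List.range m).foldl
            (fun (s : List Nat × List Nat × Nat) (j : Nat) =>
              let ca := s.1
              let dp1 := s.2.1
              let p := s.2.2
              let p := (p + j) % i
              let dp1 := dp1.set j (ca.getD p 0)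
              let ca := ca.set p ((ca.getD p 0 + dp0.getD j 0) % MOD)
              (ca, dp1, p))
            (List.replicate i 0, dp1, 0)
        let dp1' := inner.2.1
        -- dp0, dp1 = dp1, dp0 ; ans = (ans + dp0[-1]) % MOD   (dp0[-1] = last entry, m ≥ 1 under Pre_)
        (dp1', dp0, (ans + dp1'.getD (m - 1) 0) % MOD))
      (dp0, dp1, 0)
  (fin.2.2 : Int)

-- ===== PORT B =====
def solve_alt (n : Int) : Int :=
  let MOD : Nat := 1000000007
  let m : Nat := (n + 1).toNat
  let tri : List Nat := (List.range m).map (fun j => j * (j + 1) / 2)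
  let dp0 : List Nat := (List.replicate m 0).set 0 1
  let fin :=
    (List.range' 1 n.toNat).foldl
      (fun (st : List Nat × Nat) (i : Nat) =>
        let dp0 := st.1
        let ans := st.2
        -- first phase: buckets[r] = positions j whose triangular number is ≡ r (mod i), increasing
        let buckets :=
          (List.range m).foldl
            (fun (b : List (List Nat)) (j : Nat) => b.modify (tri.getD j 0 % i) (· ++ [j]))
            (List.replicate i [])
        -- second phase: prefix-scan dp0 along each bucket
        let dp1 :=
          buckets.foldl
            (fun (dp1 : List Nat) (grp : List Nat) =>
              (grp.foldl
                (fun (s : List Nat × Nat) (j : Nat) => (s.1.set j s.2, (s.2 + dp0.getD j 0) % MOD))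
                (dp1, 0)).1)
            (List.replicate m 0)
        (dp1, (ans + dp1.getD (m - 1) 0) % MOD))
      (dp0, 0)
  (fin.2 : Int)

-- ===== PRECONDITION & SPEC =====
-- Pre_ excludes exactly negative n, on which A raises IndexError (assigning into an empty dp list).
def Pre_solve (n : Int) : Prop := 0 ≤ n
instance (n : Int) : Decidable (Pre_solve n) := by unfold Pre_solve; infer_instance
def pvWitness_solve : Int := 3
def Spec_solve (n : Int) (out : Int) : Prop := out = solve_alt n
instance (n : Int) (out : Int) : Decidable (Spec_solve n out) := by unfold Spec_solve; infer_instance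

-- ===== CLAIM (what is proved, stated in full; the proofs are below) =====
def Claim_equal_solve : Prop := ∀ (n : Int), Dom_solve n → Pre_solve n → Spec_solve n (solve n)

-- ===== LEMMAS AND PROOFS =====

-- named versions of the ports' step functions (definitionally equal to the inline lambdas)
def pvR (i j : Nat) : Nat := j * (j + 1) / 2 % i

def pvStepA (dp0 : List Nat) (i : Nat) (s : List Nat × List Nat × Nat) (j : Nat) :
    List Nat × List Nat × Nat :=
  let ca := s.1
  let dp1 := s.2.1
  let p := s.2.2
  let p := (p + j) % i
  let dp1 := dp1.set j (ca.getD p 0)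
  let ca := ca.set p ((ca.getD p 0 + dp0.getD j 0) % 1000000007)
  (ca, dp1, p)

def pvInnerA (dp0 init : List Nat) (i m : Nat) : List Nat × List Nat × Nat :=
  (List.range m).foldl (pvStepA dp0 i) (List.replicate i 0, init, 0)

def pvStepOuterA (m : Nat) (st : List Nat × List Nat × Nat) (i : Nat) :
    List Nat × List Nat × Nat :=
  let dp1' := (pvInnerA st.1 st.2.1 i m).2.1
  (dp1', st.1, (st.2.2 + dp1'.getD (m - 1) 0) % 1000000007)

def pvTriL (m : Nat) : List Nat := (List.range m).map (fun j => j * (j + 1) / 2)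

def pvStepBkt (tri : List Nat) (i : Nat) (b : List (List Nat)) (j : Nat) : List (List Nat) :=
  b.modify (tri.getD j 0 % i) (· ++ [j])

def pvBuckets (i m : Nat) : List (List Nat) :=
  (List.range m).foldl (pvStepBkt (pvTriL m) i) (List.replicate i [])

def pvStepS (dp0 : List Nat) (s : List Nat × Nat) (j : Nat) : List Nat × Nat :=
  (s.1.set j s.2, (s.2 + dp0.getD j 0) % 1000000007)

def pvPhase2 (dp0 : List Nat) (i m : Nat) : List Nat :=
  (pvBuckets i m).foldl (fun dp1 grp => (grp.foldl (pvStepS dp0) (dp1, 0)).1)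
    (List.replicate m 0)

def pvStepOuterB (m : Nat) (st : List Nat × Nat) (i : Nat) : List Nat × Nat :=
  let dp1 := pvPhase2 st.1 i m
  (dp1, (st.2 + dp1.getD (m - 1) 0) % 1000000007)

-- the common specification of one dp transition
def pvFold (dp0 : List Nat) (s : Nat) (L : List Nat) : Nat :=
  L.foldl (fun a k => (a + dp0.getD k 0) % 1000000007) s

def pvF (dp0 : List Nat) (i t q : Nat) : Nat :=
  pvFold dp0 0 ((List.range t).filter (fun k => pvR i k = q))

def pvNewDP (dp0 : List Nat) (i m : Nat) : List Nat :=
  (List.range m).map (fun j => pvF dp0 i j (pvR i j))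

lemma pvNewDP_length (dp0 : List Nat) (i m : Nat) : (pvNewDP dp0 i m).length = m := by
  simp [pvNewDP]

-- basic getD facts
lemma pv_getD_set_self (l : List Nat) (a j : Nat) (h : j < l.length) :
    (l.set j a).getD j 0 = a := by
  simp [List.getD, List.getElem?_set_self h]

lemma pv_getD_set_ne (l : List Nat) (a j q : Nat) (h : j ≠ q) :
    (l.set j a).getD q 0 = l.getD q 0 := by
  simp [List.getD, List.getElem?_set_ne h]


lemma pvTri (t : Nat) : t * (t - 1) / 2 + t = t * (t + 1) / 2 := by
  have h1 : 2 * (t * (t - 1) / 2) = t * (t - 1) := by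
    rcases Nat.even_mul_pred_self t with ⟨c, hc⟩
    omega
  have h2 : 2 * (t * (t + 1) / 2) = t * (t + 1) := by
    rcases Nat.even_mul_succ_self t with ⟨c, hc⟩
    omega
  have h3 : t * (t + 1) = t * (t - 1) + 2 * t := by
    cases t with
    | zero => simp
    | succ s =>
        have : s + 1 - 1 = s := rfl
        rw [this]
        ring
  omega

lemma pvR_lt (i j : Nat) (hi : 0 < i) : pvR i j < i := Nat.mod_lt _ hi

lemma pvF_succ (dp0 : List Nat) (i t q : Nat) :
    pvF dp0 i (t + 1) q =
      if pvR i t = q then (pvF dp0 i t q + dp0.getD t 0) % 1000000007 else pvF dp0 i t q := by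
  unfold pvF
  rw [List.range_succ, List.filter_append]
  by_cases h : pvR i t = q <;> simp [h, pvFold, List.foldl_append]


-- A's inner pass invariant
lemma pvInvA (dp0 init : List Nat) (i : Nat) (hi : 0 < i) : ∀ t : Nat,
    (∀ q, ((List.range t).foldl (pvStepA dp0 i) (List.replicate i 0, init, 0)).1.getD q 0
        = pvF dp0 i t q) ∧
    ((List.range t).foldl (pvStepA dp0 i) (List.replicate i 0, init, 0)).1.length = i ∧
    ((List.range t).foldl (pvStepA dp0 i) (List.replicate i 0, init, 0)).2.1.length = init.length ∧
    (∀ j, j < init.length → ((List.range t).foldl (pvStepA dp0 i) (List.replicate i 0, init, 0)).2.1.getD j 0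
        = if j < t then pvF dp0 i j (pvR i j) else init.getD j 0) ∧
    ((List.range t).foldl (pvStepA dp0 i) (List.replicate i 0, init, 0)).2.2 = t * (t - 1) / 2 % i := by
  intro t
  induction t with
  | zero =>
      refine ⟨fun q => ?_, by simp, by simp, fun j _ => by simp, by simp⟩
      simp [pvF, pvFold]
  | succ t ih =>
      obtain ⟨hca, hcal, hdl, hdp, hp⟩ := ih
      rw [List.range_succ, List.foldl_append]
      set st := (List.range t).foldl (pvStepA dp0 i) (List.replicate i 0, init, 0) with hst
      simp only [List.foldl_cons, List.foldl_nil]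
      have hpt : (st.2.2 + t) % i = pvR i t := by
        rw [hp, Nat.mod_add_mod, pvTri, pvR]
      have hplt : pvR i t < i := pvR_lt i t hi
      refine ⟨fun q => ?_, ?_, ?_, fun j hj => ?_, ?_⟩
      · -- ca clause
        simp only [pvStepA, hpt]
        by_cases hq : pvR i t = q
        · subst hq
          rw [pv_getD_set_self _ _ _ (by omega), hca, pvF_succ]
          simp
        · rw [pv_getD_set_ne _ _ _ _ hq, hca, pvF_succ]
          simp [hq]
      · simp [pvStepA, hcal]
      · simp [pvStepA, hdl]
      · -- dp1 clause
        simp only [pvStepA, hpt]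
        rcases Nat.lt_trichotomy j t with hlt | heq | hgt
        · rw [pv_getD_set_ne _ _ _ _ (by omega), hdp j hj]
          simp [hlt, Nat.lt_succ_of_lt hlt]
        · subst heq
          rw [pv_getD_set_self _ _ _ (by omega), hca]
          simp
        · rw [pv_getD_set_ne _ _ _ _ (by omega), hdp j hj]
          have h1 : ¬ j < t := by omega
          have h2 : ¬ j < t + 1 := by omega
          simp [h1, h2]
      · simp only [pvStepA, hpt, pvR]
        have : (t + 1) * (t + 1 - 1) = t * (t + 1) := by
          simp [Nat.mul_comm]
        rw [this]

lemma pvInnerA_eq (dp0 init : List Nat) (i m : Nat) (hi : 0 < i) (hinit : init.length = m) :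
    (pvInnerA dp0 init i m).2.1 = pvNewDP dp0 i m := by
  obtain ⟨-, -, hdl, hdp, -⟩ := pvInvA dp0 init i hi m
  apply List.ext_getElem
  · rw [show (pvNewDP dp0 i m).length = m by simp [pvNewDP]]
    exact hdl.trans hinit
  · intro j h1 h2
    have hjm : j < m := by simpa [pvNewDP] using h2
    have := hdp j (by omega)
    rw [if_pos hjm] at this
    have hget : (pvInnerA dp0 init i m).2.1[j] = (pvInnerA dp0 init i m).2.1.getD j 0 := by
      simp [List.getD, List.getElem?_eq_getElem h1]
    rw [hget]
    unfold pvInnerA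
    rw [this]
    simp only [pvNewDP]
    rw [List.getElem_map, List.getElem_range]

-- B's bucket construction
lemma pvTriL_getD (m j : Nat) (h : j < m) : (pvTriL m).getD j 0 = j * (j + 1) / 2 := by
  simp [pvTriL, List.getD, List.getElem?_map, List.getElem?_range h]

lemma pvBuckets_inv (i m : Nat) (hi : 0 < i) : ∀ t : Nat, t ≤ m →
    ((List.range t).foldl (pvStepBkt (pvTriL m) i) (List.replicate i [])).length = i ∧
    (∀ g, ((List.range t).foldl (pvStepBkt (pvTriL m) i) (List.replicate i [])).getD g []
        = (List.range t).filter (fun k => pvR i k = g)) := by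
  intro t
  induction t with
  | zero =>
      intro _
      refine ⟨by simp, fun g => ?_⟩
      rcases lt_or_ge g i with h | h
      · simp [List.getD, h]
      · simp [List.getD,
          List.getElem?_eq_none (l := List.replicate i ([] : List Nat)) (by simpa using h)]
  | succ t ih =>
      intro htm
      obtain ⟨hl, he⟩ := ih (by omega)
      rw [List.range_succ, List.foldl_append]
      set b := (List.range t).foldl (pvStepBkt (pvTriL m) i) (List.replicate i []) with hb
      simp only [List.foldl_cons, List.foldl_nil]
      have htri : (pvTriL m).getD t 0 = t * (t + 1) / 2 := pvTriL_getD m t (by omega)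
      refine ⟨by simp [pvStepBkt, hl], fun g => ?_⟩
      have hklt : pvR i t < b.length := by rw [hl]; exact pvR_lt i t hi
      rw [List.filter_append]
      by_cases hg : g < i
      · have hgb : g < b.length := by omega
        have : (b.modify ((pvTriL m).getD t 0 % i) (· ++ [t])).getD g []
            = if pvR i t = g then b.getD g [] ++ [t] else b.getD g [] := by
          have h1 : (b.modify (pvR i t) (· ++ [t]))[g]?
              = (fun a => if pvR i t = g then a ++ [t] else a) <$> b[g]? :=
            List.getElem?_modify _ _ _ _
          rw [List.getElem?_eq_getElem hgb] at h1
          by_cases hk : pvR i t = g <;>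
            simp_all [pvR, List.getD]
        simp only [pvStepBkt] at this ⊢
        rw [this, he g]
        by_cases hk : pvR i t = g <;> simp [hk]
      · have h1 : (b.modify ((pvTriL m).getD t 0 % i) (· ++ [t])).getD g [] = [] := by
          have : (b.modify ((pvTriL m).getD t 0 % i) (· ++ [t])).length = b.length :=
            List.length_modify _ _ _
          have hlen2 : (b.modify ((pvTriL m).getD t 0 % i) (· ++ [t])).length ≤ g := by
            rw [this, hl]; omega
          exact List.getD_eq_default _ _ hlen2
        simp only [pvStepBkt] at h1 ⊢
        rw [h1]
        have h2 : (List.range t).filter (fun k => pvR i k = g) = [] := by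
          apply List.filter_eq_nil_iff.mpr
          intro k _
          have := pvR_lt i k hi
          simp only [decide_eq_true_eq]
          omega
        have h3 : pvR i t ≠ g := by have := pvR_lt i t hi; omega
        simp [h2, h3]

lemma pvBuckets_eq (i m : Nat) (hi : 0 < i) :
    pvBuckets i m = (List.range i).map (fun g => (List.range m).filter (fun k => pvR i k = g)) := by
  obtain ⟨hl, he⟩ := pvBuckets_inv i m hi m le_rfl
  apply List.ext_getElem
  · simpa using hl
  · intro g h1 h2
    have hgi : g < i := by simpa using h2
    rw [List.getElem_map, List.getElem_range]
    have hh : (pvBuckets i m)[g] = (pvBuckets i m).getD g [] := by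
      simp [List.getD, List.getElem?_eq_getElem h1]
    rw [hh]
    exact he g

-- B's per-group prefix scan
lemma pvScan_spec (dp0 : List Nat) : ∀ (L dp1 : List Nat) (s : Nat), L.Pairwise (· < ·) →
    (L.foldl (pvStepS dp0) (dp1, s)).1.length = dp1.length ∧
    (∀ j, (L.foldl (pvStepS dp0) (dp1, s)).1.getD j 0
        = if j ∈ L ∧ j < dp1.length then pvFold dp0 s (L.filter (fun k => decide (k < j)))
          else dp1.getD j 0) := by
  intro L
  induction L with
  | nil => exact fun dp1 s _ => ⟨rfl, fun j => by simp⟩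
  | cons a L' ih =>
      intro dp1 s hpw
      obtain ⟨ha, hp'⟩ := List.pairwise_cons.mp hpw
      simp only [List.foldl_cons]
      obtain ⟨ihl, ihe⟩ := ih (dp1.set a s) ((s + dp0.getD a 0) % 1000000007) hp'
      refine ⟨by simp only [pvStepS]; rw [ihl]; simp, fun j => ?_⟩
      have hstep : pvStepS dp0 (dp1, s) a = (dp1.set a s, (s + dp0.getD a 0) % 1000000007) := rfl
      rw [hstep, ihe j]
      by_cases hjL' : j ∈ L'
      · have haj : a < j := ha j hjL'
        have hfc : (a :: L').filter (fun k => decide (k < j))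
            = a :: L'.filter (fun k => decide (k < j)) := by simp [haj]
        have hlen : (dp1.set a s).length = dp1.length := by simp
        rw [hlen, hfc]
        have hfold : pvFold dp0 s (a :: L'.filter (fun k => decide (k < j)))
            = pvFold dp0 ((s + dp0.getD a 0) % 1000000007) (L'.filter (fun k => decide (k < j))) := rfl
        by_cases hjlen : j < dp1.length
        · simp only [hjL', hjlen, List.mem_cons, or_true, and_self, if_pos trivial]
          exact hfold.symm
        · rw [if_neg (by simp [hjlen]), if_neg (by simp [hjlen])]
          exact pv_getD_set_ne _ _ _ _ (by omega)
      · by_cases hja : j = a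
        · subst hja
          have hmem : j ∉ L' := hjL'
          have hfilt : (j :: L').filter (fun k => decide (k < j)) = [] := by
            simp only [List.filter_cons]
            rw [if_neg (by simp)]
            apply List.filter_eq_nil_iff.mpr
            intro x hx
            have := ha x hx
            simp only [decide_eq_true_eq]
            omega
          rw [if_neg (by simp [hmem]), hfilt]
          by_cases hjlen : j < dp1.length
          · rw [if_pos ⟨by simp, hjlen⟩]
            exact pv_getD_set_self _ _ _ hjlen
          · rw [if_neg (by simp [hjlen])]
            rw [List.set_eq_of_length_le (by omega)]
        · have hnc : j ∉ a :: L' := by simp [hja, hjL']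
          rw [if_neg (by simp [hjL']), if_neg (by simp [hja, hjL'])]
          exact pv_getD_set_ne _ _ _ _ (fun h => hja h.symm)

lemma pvRange_filter_lt (j m : Nat) (h : j ≤ m) :
    (List.range m).filter (fun k => decide (k < j)) = List.range j := by
  obtain ⟨d, rfl⟩ : ∃ d, m = j + d := ⟨m - j, by omega⟩
  rw [List.range_add, List.filter_append]
  have h1 : (List.range j).filter (fun k => decide (k < j)) = List.range j :=
    List.filter_eq_self.mpr (fun a hamem => by simpa using List.mem_range.mp hamem)
  have h2 : ((List.range d).map (fun x => j + x)).filter (fun k => decide (k < j)) = [] := by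
    apply List.filter_eq_nil_iff.mpr
    intro k hk
    obtain ⟨x, -, rfl⟩ := List.mem_map.mp hk
    simp
  rw [h1, h2, List.append_nil]

lemma pvPhase2_inv (dp0 : List Nat) (i m : Nat) (_hi : 0 < i) :
    ∀ (G : List Nat) (dp1 : List Nat), dp1.length = m →
    ((G.map (fun g => (List.range m).filter (fun k => pvR i k = g))).foldl
        (fun dp1 grp => (grp.foldl (pvStepS dp0) (dp1, 0)).1) dp1).length = m ∧
    (∀ j, ((G.map (fun g => (List.range m).filter (fun k => pvR i k = g))).foldl
        (fun dp1 grp => (grp.foldl (pvStepS dp0) (dp1, 0)).1) dp1).getD j 0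
        = if j < m ∧ pvR i j ∈ G then pvF dp0 i j (pvR i j) else dp1.getD j 0) := by
  intro G
  induction G with
  | nil => exact fun dp1 h => ⟨h, fun j => by simp⟩
  | cons g G' ih =>
      intro dp1 hdl
      simp only [List.map_cons, List.foldl_cons]
      set L := (List.range m).filter (fun k => pvR i k = g) with hL
      have hpw : L.Pairwise (· < ·) := List.pairwise_lt_range.filter _
      obtain ⟨hsl, hse⟩ := pvScan_spec dp0 L dp1 0 hpw
      set dp1' := (L.foldl (pvStepS dp0) (dp1, 0)).1 with hdp1'
      have hdl' : dp1'.length = m := hsl.trans hdl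
      obtain ⟨ihl, ihe⟩ := ih dp1' hdl'
      refine ⟨ihl, fun j => ?_⟩
      rw [ihe j]
      by_cases h1 : j < m ∧ pvR i j ∈ G'
      · rw [if_pos h1, if_pos ⟨h1.1, List.mem_cons_of_mem g h1.2⟩]
      · rw [if_neg h1, hse j]
        by_cases h2 : j < m ∧ pvR i j = g
        · have hjL : j ∈ L := by
            rw [hL]
            exact List.mem_filter.mpr ⟨List.mem_range.mpr h2.1, by simp [h2.2]⟩
          rw [if_pos ⟨hjL, by omega⟩, if_pos ⟨h2.1, by simp [h2.2]⟩]
          have hcomm : L.filter (fun k => decide (k < j))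
              = (List.range j).filter (fun k => pvR i k = g) := by
            rw [hL, List.filter_comm, pvRange_filter_lt j m (by omega)]
          rw [hcomm, h2.2]
          rfl
        · have hjL : j ∉ L ∨ ¬ j < dp1.length := by
            by_cases hjm : j < m
            · left
              intro hmem
              have := (List.mem_filter.mp (hL ▸ hmem)).2
              simp only [decide_eq_true_eq] at this
              exact h2 ⟨hjm, this⟩
            · right; omega
          have hcond : ¬ (j ∈ L ∧ j < dp1.length) := by tauto
          rw [if_neg hcond, if_neg (by
            intro h
            rcases List.mem_cons.mp h.2 with h' | h'
            · exact h2 ⟨h.1, h'⟩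
            · exact h1 ⟨h.1, h'⟩)]

lemma pvPhase2_eq (dp0 : List Nat) (i m : Nat) (hi : 0 < i) :
    pvPhase2 dp0 i m = pvNewDP dp0 i m := by
  unfold pvPhase2
  rw [pvBuckets_eq i m hi]
  obtain ⟨hl, he⟩ := pvPhase2_inv dp0 i m hi (List.range i) (List.replicate m 0) (by simp)
  apply List.ext_getElem
  · rw [hl, pvNewDP_length]
  · intro j h1 h2
    have hjm : j < m := by simpa [pvNewDP] using h2
    have hmem : pvR i j ∈ List.range i := List.mem_range.mpr (pvR_lt i j hi)
    have := he j
    rw [if_pos ⟨hjm, hmem⟩] at this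
    have hget : (((List.range i).map (fun g => (List.range m).filter (fun k => pvR i k = g))).foldl
        (fun dp1 grp => (grp.foldl (pvStepS dp0) (dp1, 0)).1) (List.replicate m 0))[j]
        = (((List.range i).map (fun g => (List.range m).filter (fun k => pvR i k = g))).foldl
        (fun dp1 grp => (grp.foldl (pvStepS dp0) (dp1, 0)).1) (List.replicate m 0)).getD j 0 := by
      simp [List.getD, List.getElem?_eq_getElem h1]
    rw [hget, this]
    simp only [pvNewDP]
    rw [List.getElem_map, List.getElem_range]

-- the two outer loops stay in lock-step
lemma pvOuter_eq (m : Nat) : ∀ (I : List Nat), (∀ x ∈ I, 0 < x) →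
    ∀ (dp0 dp1 : List Nat) (ans : Nat), dp0.length = m → dp1.length = m →
    (I.foldl (pvStepOuterA m) (dp0, dp1, ans)).2.2 = (I.foldl (pvStepOuterB m) (dp0, ans)).2 := by
  intro I
  induction I with
  | nil => intro _ dp0 dp1 ans _ _; rfl
  | cons i I' ih =>
      intro hpos dp0 dp1 ans h0 h1
      have hi : 0 < i := hpos i (List.mem_cons_self ..)
      simp only [List.foldl_cons]
      have hA : pvStepOuterA m (dp0, dp1, ans) i
          = (pvNewDP dp0 i m, dp0, (ans + (pvNewDP dp0 i m).getD (m - 1) 0) % 1000000007) := by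
        simp only [pvStepOuterA]
        rw [pvInnerA_eq dp0 dp1 i m hi h1]
      have hB : pvStepOuterB m (dp0, ans) i
          = (pvNewDP dp0 i m, (ans + (pvNewDP dp0 i m).getD (m - 1) 0) % 1000000007) := by
        simp only [pvStepOuterB]
        rw [pvPhase2_eq dp0 i m hi]
      rw [hA, hB]
      exact ih (fun x hx => hpos x (List.mem_cons_of_mem i hx)) _ _ _ (pvNewDP_length dp0 i m) h0

-- ===== VERDICT (by name: the statement is the Claim_ definition above) =====
theorem solve_spec : Claim_equal_solve := by
  intro n _ hpre
  unfold Spec_solve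
  show (((List.range' 1 n.toNat).foldl (pvStepOuterA ((n+1).toNat))
          ((List.replicate ((n+1).toNat) 0).set 0 1, List.replicate ((n+1).toNat) 0, 0)).2.2 : Int)
      = (((List.range' 1 n.toNat).foldl (pvStepOuterB ((n+1).toNat))
          ((List.replicate ((n+1).toNat) 0).set 0 1, 0)).2 : Int)
  congr 1
  apply pvOuter_eq
  · intro x hx
    exact (List.mem_range'_1.mp hx).1
  · simp
  · simp
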